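-- pv_equiv track=rewrite | github.com/EstSyntax/EstUD | cgmorf2conllu/cgmorf2conllu.py | fix_connlu_features
-- ===== SOURCE A (Python) =====
-- def uniqArray(seq):
--     seen = set()
--     seen_add = seen.add
--     return [x for x in seq if not (x in seen or seen_add(x))]
--
-- def fix_connlu_features(features_array):
-- 	features_dict = {}
-- 	features_fixed = []
-- 	for i, v in enumerate(features_array):
-- 		feature = v.split('=')
-- 		if len(feature) == 2:
-- 			(feature_name, feature_value) = feature
-- 			if not feature_name in features_dict:
-- 				features_dict[feature_name] = []
-- 			features_dict[feature_name] = features_dict[feature_name] + feature_value.split(',')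
-- 		#eprint (feature)
-- 		#eprint (features_dict)
--
-- 	for feature in sorted(features_dict):
-- 		features_fixed.append('%s=%s' % (feature, ','.join(sorted(uniqArray(features_dict[feature])))))
-- 	return sorted(features_fixed)
-- ===== SOURCE B (Python) =====
-- def fix_connlu_features(features_array):
--     # Dict-free: first-seen list of names, then a per-name rescan collecting
--     # de-duplicated values; sort each value list and the final line list.
--     names = []
--     for v in features_array:
--         parts = v.split('=')
--         if len(parts) == 2 and parts[0] not in names:
--             names.append(parts[0])
--     result = []
--     for name in names:
--         vals = []
--         for v in features_array:
--             parts = v.split('=')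
--             if len(parts) == 2 and parts[0] == name:
--                 for x in parts[1].split(','):
--                     if x not in vals:
--                         vals.append(x)
--         vals.sort()
--         result.append(name + '=' + ','.join(vals))
--     result.sort()
--     return result
-- ===== Notes on version B (the rewrite author's own statement) =====
-- stated objective: alternative
-- what changed: Replaces the dict-of-lists grouping plus uniqArray helper with a dict-free two-phase scan: collect the first-seen list of feature names, then rescan the input per name, de-duplicating values on insertion.
import Mathlib
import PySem

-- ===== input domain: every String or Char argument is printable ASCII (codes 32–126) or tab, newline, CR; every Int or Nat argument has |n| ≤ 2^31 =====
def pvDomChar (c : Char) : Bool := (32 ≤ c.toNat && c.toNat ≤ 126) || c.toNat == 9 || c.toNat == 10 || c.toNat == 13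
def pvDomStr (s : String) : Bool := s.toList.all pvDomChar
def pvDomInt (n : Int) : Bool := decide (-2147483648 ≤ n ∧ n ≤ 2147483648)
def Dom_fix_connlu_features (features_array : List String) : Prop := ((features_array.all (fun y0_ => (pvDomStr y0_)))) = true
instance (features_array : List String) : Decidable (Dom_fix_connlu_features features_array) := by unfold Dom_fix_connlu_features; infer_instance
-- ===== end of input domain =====

-- B replaces the dict-of-lists grouping with a dict-free two-phase scan (first-seen name
-- list, then a per-name rescan de-duplicating values on insertion); same return value.

-- s.split(sep): both programs only split on the literal non-empty separators '=' and ',',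
-- where PySem.Str.split? is exact and never none
def pvSplit (s sep : String) : List String := (PySem.Str.split? s sep).getD []

-- ===== PORT A =====
-- uniqArray: the list comprehension with its 'seen' set, carried as a (seen, result) pair
def uniqArray (seq : List String) : List String :=
  (seq.foldl (fun (st : PySem.Set String × List String) x =>
      if PySem.Set.contains st.1 x then st
      else (PySem.Set.add st.1 x, st.2 ++ [x])) (PySem.Set.empty, [])).2

-- body of A's first for-loop (the enumerate index i is unused)
def pvStepA (d : PySem.Dict String (List String)) (v : String) :
    PySem.Dict String (List String) :=
  match pvSplit v "=" with
  | [feature_name, feature_value] =>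
      let d := if d.contains feature_name then d else d.insert feature_name []
      d.insert feature_name (d.getD feature_name [] ++ pvSplit feature_value ",")
  | _ => d

def fix_connlu_features (features_array : List String) : List String :=
  let features_dict := features_array.foldl pvStepA PySem.Dict.empty
  let features_fixed := (PySem.List.sorted features_dict.keys (fun k => k) false).foldl
      (fun acc feature =>
        acc ++ [feature ++ "=" ++ PySem.Str.join ","
          (PySem.List.sorted (uniqArray (features_dict.getD feature [])) (fun x => x) false)]) []
  PySem.List.sorted features_fixed (fun x => x) false

-- ===== PORT B =====
-- body of B's first loop: collect first-seen feature names
def pvStepNames (names : List String) (v : String) : List String :=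
  match pvSplit v "=" with
  | [name, _] => if names.contains name then names else names ++ [name]
  | _ => names

-- body of B's inner rescan for one name: collect its values, de-duplicating on insertion
def pvStepVals (name : String) (vals : List String) (v : String) : List String :=
  match pvSplit v "=" with
  | [n, value] =>
      if n == name then
        (pvSplit value ",").foldl
          (fun vs x => if vs.contains x then vs else vs ++ [x]) vals
      else vals
  | _ => vals

def fix_connlu_features_alt (features_array : List String) : List String :=
  let names := features_array.foldl pvStepNames []
  let result := names.foldl (fun acc name =>
      let vals := features_array.foldl (pvStepVals name) []
      acc ++ [name ++ "=" ++ PySem.Str.join ","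
        (PySem.List.sorted vals (fun x => x) false)]) []
  PySem.List.sorted result (fun x => x) false

-- ===== PRECONDITION & SPEC =====
def Spec_fix_connlu_features (features_array : List String) (out : List String) : Prop := out = fix_connlu_features_alt features_array
instance (features_array : List String) (out : List String) : Decidable (Spec_fix_connlu_features features_array out) := by unfold Spec_fix_connlu_features; infer_instance

-- ===== CLAIM (what is proved, stated in full; the proofs are below) =====
def Claim_equal_fix_connlu_features : Prop := ∀ (features_array : List String), Dom_fix_connlu_features features_array → Spec_fix_connlu_features features_array (fix_connlu_features features_array)

-- ===== LEMMAS AND PROOFS =====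

-- model: the (name, value-string) pair of an entry that splits into exactly two parts
def pvPair? (v : String) : Option (String × String) :=
  match pvSplit v "=" with
  | [n, w] => some (n, w)
  | _ => none

-- the names of the two-part entries, in encounter order (with repetitions)
def pvNamesOf (xs : List String) : List String :=
  xs.filterMap (fun v => (pvPair? v).map Prod.fst)

-- the flat comma-split value stream of name k, in encounter order (with repetitions)
def pvChunk (k : String) (v : String) : List String :=
  match pvPair? v with
  | some (n, w) => if n == k then pvSplit w "," else []
  | none => []

def pvValsOf (k : String) (xs : List String) : List String := xs.flatMap (pvChunk k)

lemma namesOf_cons (v : String) (xs : List String) :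
    pvNamesOf (v :: xs)
      = (match pvPair? v with | some (n, _) => [n] | none => []) ++ pvNamesOf xs := by
  cases h : pvPair? v with
  | none => simp [pvNamesOf, h]
  | some p => simp [pvNamesOf, h]

-- A's dict keys are the first-seen names: the Set.add fold over the name stream
lemma keysA (xs : List String) :
    ∀ d : PySem.Dict String (List String),
      (xs.foldl pvStepA d).keys = (pvNamesOf xs).foldl PySem.Set.add d.keys := by
  induction xs with
  | nil => intro d; rfl
  | cons v xs ih =>
    intro d
    rw [List.foldl_cons, ih, namesOf_cons, List.foldl_append]
    congr 1
    unfold pvStepA pvPair?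
    rcases hs : pvSplit v "=" with _ | ⟨n, _ | ⟨w, _ | ⟨c, rest⟩⟩⟩ <;> simp only [] <;>
      try rfl
    by_cases hc : d.contains n = true
    · simp only [hc, if_true, List.foldl_cons, List.foldl_nil]
      rw [PySem.Dict.keys_insert_of_contains _ _ hc]
      have hm : n ∈ d.keys := (PySem.Dict.contains_iff_mem_keys d n).1 hc
      simp [PySem.Set.add, PySem.Set.contains_eq_listContains, hm]
    · have hc' : d.contains n = false := by simpa using hc
      simp only [hc', Bool.false_eq_true, if_false, List.foldl_cons, List.foldl_nil]
      rw [PySem.Dict.keys_insert_of_contains _ _ (PySem.Dict.contains_insert_self d n []),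
        PySem.Dict.keys_insert_of_not_contains _ _ hc']
      have hm : n ∉ d.keys := fun h => by
        rw [(PySem.Dict.contains_iff_mem_keys d n).2 h] at hc'; cases hc'
      simp [PySem.Set.add, PySem.Set.contains_eq_listContains, hm]

-- A's dict value for k accumulates the flat value stream of k
lemma getDA (xs : List String) :
    ∀ (d : PySem.Dict String (List String)) (k : String),
      (xs.foldl pvStepA d).getD k [] = d.getD k [] ++ pvValsOf k xs := by
  induction xs with
  | nil => intro d k; simp [pvValsOf]
  | cons v xs ih =>
    intro d k
    have hvals : pvValsOf k (v :: xs) = pvChunk k v ++ pvValsOf k xs := by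
      simp [pvValsOf]
    rw [List.foldl_cons, ih, hvals]
    have hstep : (pvStepA d v).getD k [] = d.getD k [] ++ pvChunk k v := by
      unfold pvStepA pvChunk pvPair?
      rcases hs : pvSplit v "=" with _ | ⟨n, _ | ⟨w, _ | ⟨c, rest⟩⟩⟩ <;> simp only [] <;>
        try simp
      have hd1 : (if d.contains n then d else d.insert n []).getD n [] = d.getD n []
          ∧ ∀ k', k' ≠ n → (if d.contains n then d else d.insert n []).getD k' [] = d.getD k' [] := by
        by_cases hc : d.contains n = true
        · simp [hc]
        · have hc' : d.contains n = false := by simpa using hc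
          simp only [hc', Bool.false_eq_true, if_false]
          refine ⟨?_, fun k' hk' => PySem.Dict.getD_insert_of_ne d _ _ hk'⟩
          rw [PySem.Dict.getD_insert_self, PySem.Dict.getD_of_not_contains d _ hc']
      by_cases hk : n = k
      · subst hk
        simp [PySem.Dict.getD_insert_self, hd1.1]
      · have hkn : k ≠ n := fun h => hk h.symm
        rw [PySem.Dict.getD_insert_of_ne _ _ _ hkn, hd1.2 k hkn]
        simp [hk]
    rw [hstep, List.append_assoc]

-- B's name loop is the same Set.add fold over the name stream
lemma namesB (xs : List String) :
    ∀ ns : List String,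
      xs.foldl pvStepNames ns = (pvNamesOf xs).foldl PySem.Set.add ns := by
  induction xs with
  | nil => intro ns; rfl
  | cons v xs ih =>
    intro ns
    rw [List.foldl_cons, ih, namesOf_cons, List.foldl_append]
    congr 1
    unfold pvStepNames pvPair?
    rcases hs : pvSplit v "=" with _ | ⟨n, _ | ⟨w, _ | ⟨c, rest⟩⟩⟩ <;> rfl

-- B's value loop for k is the Set.add fold over the flat value stream of k
lemma valsB (k : String) (xs : List String) :
    ∀ vs : List String,
      xs.foldl (pvStepVals k) vs = (pvValsOf k xs).foldl PySem.Set.add vs := by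
  induction xs with
  | nil => intro vs; rfl
  | cons v xs ih =>
    intro vs
    have hvals : pvValsOf k (v :: xs) = pvChunk k v ++ pvValsOf k xs := by
      simp [pvValsOf]
    rw [List.foldl_cons, ih, hvals, List.foldl_append]
    congr 1
    unfold pvStepVals pvChunk pvPair?
    rcases hs : pvSplit v "=" with _ | ⟨n, _ | ⟨w, _ | ⟨c, rest⟩⟩⟩ <;> try rfl
    show (if (n == k) = true then
        List.foldl (fun vs x => if vs.contains x = true then vs else vs ++ [x]) vs (pvSplit w ",")
      else vs)
      = List.foldl PySem.Set.add vs (if (n == k) = true then pvSplit w "," else [])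
    by_cases hk : (n == k) = true
    · rw [if_pos hk, if_pos hk]; rfl
    · rw [if_neg hk, if_neg hk]; rfl

-- the seen-set and the result list of uniqArray coincide: both are the Set.add fold
lemma uniqArray_eq_ofList (seq : List String) :
    uniqArray seq = PySem.Set.ofList seq := by
  have h : ∀ (l : List String) (s : PySem.Set String),
      l.foldl (fun (st : PySem.Set String × List String) x =>
        if PySem.Set.contains st.1 x then st
        else (PySem.Set.add st.1 x, st.2 ++ [x])) (s, s)
      = (l.foldl PySem.Set.add s, l.foldl PySem.Set.add s) := by
    intro l
    induction l with
    | nil => intro s; rfl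
    | cons x l ih =>
      intro s
      rw [List.foldl_cons, List.foldl_cons]
      by_cases hc : PySem.Set.contains s x = true
      · have hadd : PySem.Set.add s x = s := by unfold PySem.Set.add; rw [if_pos hc]
        rw [if_pos hc, hadd]
        exact ih s
      · have hadd : PySem.Set.add s x = s ++ [x] := by unfold PySem.Set.add; rw [if_neg hc]
        rw [if_neg hc, hadd]
        exact ih (s ++ [x])
  have h2 := h seq []
  unfold uniqArray
  rw [show (PySem.Set.empty, ([] : List String)) = (([] : PySem.Set String), ([] : List String)) from rfl,
    h2, PySem.Set.ofList_eq_foldl]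

-- ===== VERDICT (by name: the statement is the Claim_ definition above) =====
theorem fix_connlu_features_spec : Claim_equal_fix_connlu_features := by
  intro xs _
  unfold Spec_fix_connlu_features fix_connlu_features fix_connlu_features_alt
  have hkeys : (xs.foldl pvStepA PySem.Dict.empty).keys
      = (pvNamesOf xs).foldl PySem.Set.add [] := by
    rw [keysA]; rfl
  set K : List String := (pvNamesOf xs).foldl PySem.Set.add [] with hK
  set f : String → String := fun k =>
    k ++ "=" ++ PySem.Str.join ","
      (PySem.List.sorted ((pvValsOf k xs).foldl PySem.Set.add []) (fun x => x) false)
    with hf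
  have hA : (PySem.List.sorted (xs.foldl pvStepA PySem.Dict.empty).keys (fun k => k) false).foldl
      (fun acc feature =>
        acc ++ [feature ++ "=" ++ PySem.Str.join ","
          (PySem.List.sorted (uniqArray ((xs.foldl pvStepA PySem.Dict.empty).getD feature []))
            (fun x => x) false)]) []
      = (PySem.List.sorted K (fun k => k) false).map f := by
    rw [hkeys, PySem.List.foldl_append_singleton_eq_map]
    simp only [List.nil_append]
    apply List.map_congr_left
    intro k _
    have hv : (xs.foldl pvStepA PySem.Dict.empty).getD k [] = pvValsOf k xs := by
      rw [getDA]; rfl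
    rw [hv, uniqArray_eq_ofList, hf, PySem.Set.ofList_eq_foldl]
  have hB : (xs.foldl pvStepNames []).foldl (fun acc name =>
        acc ++ [name ++ "=" ++ PySem.Str.join ","
          (PySem.List.sorted (xs.foldl (pvStepVals name) []) (fun x => x) false)]) []
      = K.map f := by
    rw [namesB, ← hK, PySem.List.foldl_append_singleton_eq_map]
    simp only [List.nil_append]
    apply List.map_congr_left
    intro k _
    rw [valsB k xs []]
  simp only [hA, hB]
  exact PySem.List.sorted_eq_sorted_of_perm _ _ (fun x => x) (fun a b h => h)
    (List.Perm.map f (PySem.List.sorted_perm K (fun k => k) false))
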